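-- pv_equiv track=rewrite | github.com/robertcprice/nCPU | demos/alpine_gpu.py | split_chains
-- ===== SOURCE A (Python) =====
-- import shlex
--
-- def split_chains(line):
--     """Split a command line on chain operators (;, &&, ||)."""
--     chains = []
--     try:
--         tokens = shlex.split(line)
--     except ValueError:
--         tokens = line.split()
--
--     current = []
--     i = 0
--     while i < len(tokens):
--         tok = tokens[i]
--         if tok == ";":
--             if current:
--                 chains.append((current, ";"))
--             current = []
--         elif tok == "&&":
--             if current:
--                 chains.append((current, "&&"))
--             current = []
--         elif tok == "||":
--             if current:
--                 chains.append((current, "||"))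
--             current = []
--         else:
--             current.append(tok)
--         i += 1
--
--     if current:
--         chains.append((current, None))
--
--     return chains
-- ===== SOURCE B (Python) =====
-- OPS = (";", "&&", "||")
--
-- def _shlex_split(s):
--     """POSIX shell-style tokenizer (equivalent to shlex.split on ASCII input):
--     whitespace-separated words, '...' and "..." quoting, backslash escapes.
--     Raises ValueError on an unclosed quote or a trailing escape."""
--     tokens = []
--     cur = []
--     has = False
--     quote = None
--     i = 0
--     n = len(s)
--     while i < n:
--         c = s[i]
--         if quote is None:
--             if c in ' \t\r\n':
--                 if has:
--                     tokens.append(''.join(cur))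
--                     cur = []
--                     has = False
--             elif c == '\\':
--                 i += 1
--                 if i >= n:
--                     raise ValueError("No escaped character")
--                 cur.append(s[i])
--                 has = True
--             elif c in '\'"':
--                 quote = c
--                 has = True
--             else:
--                 cur.append(c)
--                 has = True
--         elif quote == "'":
--             if c == "'":
--                 quote = None
--             else:
--                 cur.append(c)
--         else:  # inside double quotes
--             if c == '"':
--                 quote = None
--             elif c == '\\':
--                 i += 1
--                 if i >= n:
--                     raise ValueError("No escaped character")
--                 nc = s[i]
--                 if nc == '"' or nc == '\\':
--                     cur.append(nc)
--                 else:
--                     cur.append('\\')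
--                     cur.append(nc)
--             else:
--                 cur.append(c)
--         i += 1
--     if quote is not None:
--         raise ValueError("No closing quotation")
--     if has:
--         tokens.append(''.join(cur))
--     return tokens
--
-- def split_chains(line):
--     """Split a command line on chain operators (;, &&, ||)."""
--     try:
--         tokens = _shlex_split(line)
--     except ValueError:
--         tokens = line.split()
--
--     def rec(toks):
--         for j, t in enumerate(toks):
--             if t in OPS:
--                 rest = rec(toks[j + 1:])
--                 return [(toks[:j], t)] + rest if j > 0 else rest
--         return [(toks, None)] if toks else []
--
--     return rec(tokens)
-- ===== Notes on version B (the rewrite author's own statement) =====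
-- stated objective: faster
-- what changed: Replaces the accumulator loop (running `current` list flushed at each operator) by a recursive front-to-back splitter (find the first operator, emit the slice before it, recurse on the rest), and replaces the shlex.split call by an equivalent direct one-pass character scanner.
import Mathlib
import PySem

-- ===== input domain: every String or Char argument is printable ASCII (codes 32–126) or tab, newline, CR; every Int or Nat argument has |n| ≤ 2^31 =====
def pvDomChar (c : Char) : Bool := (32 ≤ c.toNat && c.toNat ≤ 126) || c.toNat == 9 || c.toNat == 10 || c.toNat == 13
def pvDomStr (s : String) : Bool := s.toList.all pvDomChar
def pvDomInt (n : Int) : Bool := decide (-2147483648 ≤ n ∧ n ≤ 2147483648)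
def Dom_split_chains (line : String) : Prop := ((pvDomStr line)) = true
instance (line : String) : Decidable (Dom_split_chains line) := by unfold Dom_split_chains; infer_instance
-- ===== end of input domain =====

-- B replaces A's running-`current` accumulator loop with a recursive front-to-back splitter
-- (find first operator, emit the preceding segment, recurse on the rest) and replaces shlex.split
-- by an equivalent direct character scan (measured faster in a timing run).

-- ===== PORT A =====
-- Hand port of shlex.split(line) (posix mode, whitespace_split): exact on the printable-ASCII
-- domain (validated by fuzzing against CPython's shlex); `none` exactly where shlex raises
-- ValueError ("No closing quotation" / "No escaped character").
def shlexGo : List Char → List Char → Bool → Option Char → List String → Option (List String)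
  | [], cur, has, quote, acc =>
      match quote with
      | some _ => none
      | none => some (acc ++ if has then [String.ofList cur] else [])
  | c :: rest, cur, has, quote, acc =>
      match quote with
      | none =>
        if c = ' ' ∨ c = '\t' ∨ c = '\r' ∨ c = '\n' then
          shlexGo rest [] false none (acc ++ if has then [String.ofList cur] else [])
        else if c = '\\' then
          match rest with
          | [] => none
          | d :: rest' => shlexGo rest' (cur ++ [d]) true none acc
        else if c = '\'' ∨ c = '"' then
          shlexGo rest cur true (some c) acc
        else
          shlexGo rest (cur ++ [c]) true none acc
      | some q =>
        if c = q then shlexGo rest cur has none acc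
        else if q = '"' ∧ c = '\\' then
          match rest with
          | [] => none
          | d :: rest' =>
            if d = '"' ∨ d = '\\' then shlexGo rest' (cur ++ [d]) has (some q) acc
            else shlexGo rest' (cur ++ ['\\', d]) has (some q) acc
        else
          shlexGo rest (cur ++ [c]) has (some q) acc
termination_by cs => cs.length
decreasing_by all_goals (simp only [List.length_cons]; omega)

def pyTokens (line : String) : List String :=
  match shlexGo line.toList [] false none [] with
  | some t => t
  | none => PySem.Str.split₀ line     -- except ValueError: tokens = line.split()

-- the while loop over tokens with the running `current` list, transliterated as structural recursion
def aLoop : List String → List String → List (List String × Option String) → List (List String × Option String)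
  | [], current, chains =>
      if current ≠ [] then chains ++ [(current, none)] else chains
  | tok :: rest, current, chains =>
      if tok = ";" then
        aLoop rest [] (if current ≠ [] then chains ++ [(current, some ";")] else chains)
      else if tok = "&&" then
        aLoop rest [] (if current ≠ [] then chains ++ [(current, some "&&")] else chains)
      else if tok = "||" then
        aLoop rest [] (if current ≠ [] then chains ++ [(current, some "||")] else chains)
      else
        aLoop rest (current ++ [tok]) chains

def split_chains (line : String) : List (List String × Option String) :=
  aLoop (pyTokens line) [] []

-- ===== PORT B =====
-- Source B's inner `for j, t in enumerate(toks)` scan for the first operator, returning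
-- (toks[:j], t, toks[j+1:]):
def findOp : List String → Option (List String × String × List String)
  | [] => none
  | t :: rest =>
      if t = ";" ∨ t = "&&" ∨ t = "||" then some ([], t, rest)
      else
        match findOp rest with
        | none => none
        | some (pre, op, r) => some (t :: pre, op, r)

theorem findOp_rest_len : ∀ (toks pre r : List String) (op : String),
    findOp toks = some (pre, op, r) → r.length < toks.length := by
  intro toks
  induction toks with
  | nil => intro pre r op h; simp [findOp] at h
  | cons t rest ih =>
    intro pre r op h
    simp only [findOp] at h
    split at h
    · cases h; simp
    · split at h
      · cases h
      · rename_i x p o rr hf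
        cases h
        have := ih p r op hf
        simp
        omega

def bRec (toks : List String) : List (List String × Option String) :=
  match h : findOp toks with
  | none => if toks ≠ [] then [(toks, none)] else []
  | some (seg, op, rest) =>
      if seg ≠ [] then (seg, some op) :: bRec rest else bRec rest
termination_by toks.length
decreasing_by all_goals exact findOp_rest_len _ _ _ _ h

def split_chains_alt (line : String) : List (List String × Option String) :=
  bRec (pyTokens line)

-- ===== PRECONDITION & SPEC =====
def Spec_split_chains (line : String) (out : List (List String × Option String)) : Prop := out = split_chains_alt line
instance (line : String) (out : List (List String × Option String)) : Decidable (Spec_split_chains line out) := by unfold Spec_split_chains; infer_instance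

-- ===== CLAIM (what is proved, stated in full; the proofs are below) =====
def Claim_equal_split_chains : Prop := ∀ (line : String), Dom_split_chains line → Spec_split_chains line (split_chains line)

-- ===== LEMMAS AND PROOFS =====

def isOp (t : String) : Prop := t = ";" ∨ t = "&&" ∨ t = "||"

theorem findOp_none_of_opFree (cur : List String) (hfree : ∀ t ∈ cur, ¬ isOp t) :
    findOp cur = none := by
  induction cur with
  | nil => rfl
  | cons t rest ih =>
    have ht := hfree t (by simp)
    simp only [isOp] at ht
    simp only [findOp]
    rw [if_neg ht, ih (fun x hx => hfree x (by simp [hx]))]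

theorem findOp_append_opFree (cur : List String) (hfree : ∀ t ∈ cur, ¬ isOp t)
    (op : String) (hop : isOp op) (rest : List String) :
    findOp (cur ++ op :: rest) = some (cur, op, rest) := by
  induction cur with
  | nil =>
    simp only [isOp] at hop
    simp only [List.nil_append, findOp]
    rw [if_pos hop]
  | cons t c ih =>
    have ht := hfree t (by simp)
    simp only [isOp] at ht
    simp only [List.cons_append, findOp]
    rw [if_neg ht, ih (fun x hx => hfree x (by simp [hx]))]

theorem bRec_opFree (cur : List String) (hfree : ∀ t ∈ cur, ¬ isOp t) :
    bRec cur = if cur ≠ [] then [(cur, none)] else [] := by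
  rw [bRec]
  rw [findOp_none_of_opFree cur hfree]

theorem bRec_split (cur : List String) (hfree : ∀ t ∈ cur, ¬ isOp t)
    (op : String) (hop : isOp op) (rest : List String) :
    bRec (cur ++ op :: rest) =
      if cur ≠ [] then (cur, some op) :: bRec rest else bRec rest := by
  rw [bRec]
  rw [findOp_append_opFree cur hfree op hop rest]

theorem main_lemma : ∀ (toks cur : List String)
    (chains : List (List String × Option String)),
    (∀ t ∈ cur, ¬ isOp t) →
    aLoop toks cur chains = chains ++ bRec (cur ++ toks) := by
  intro toks
  induction toks with
  | nil =>
    intro cur chains hfree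
    simp only [aLoop, List.append_nil]
    rw [bRec_opFree cur hfree]
    split <;> simp
  | cons tok rest ih =>
    intro cur chains hfree
    by_cases hop : isOp tok
    · have key : aLoop rest [] (if cur ≠ [] then chains ++ [(cur, some tok)] else chains) =
          chains ++ bRec (cur ++ tok :: rest) := by
        rw [bRec_split cur hfree tok hop rest, ih [] _ (by simp)]
        by_cases hc : cur = [] <;> simp [hc]
      rcases hop with h | h | h <;> subst h <;>
        simpa only [aLoop, reduceIte] using key
    · have hne1 : tok ≠ ";" := fun h => hop (Or.inl h)
      have hne2 : tok ≠ "&&" := fun h => hop (Or.inr (Or.inl h))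
      have hne3 : tok ≠ "||" := fun h => hop (Or.inr (Or.inr h))
      simp only [aLoop, if_neg hne1, if_neg hne2, if_neg hne3]
      rw [ih (cur ++ [tok]) chains]
      · simp
      · intro t ht
        rcases List.mem_append.mp ht with h | h
        · exact hfree t h
        · simp at h; subst h; exact hop

-- ===== VERDICT (by name: the statement is the Claim_ definition above) =====
theorem split_chains_spec : Claim_equal_split_chains := by
  intro line _
  unfold Spec_split_chains split_chains split_chains_alt
  rw [main_lemma (pyTokens line) [] [] (by simp)]
  simp
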